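-- pv_equiv track=rewrite | github.com/jessvilla1975/Dinamica_Voraz | terminalInteligente/voraz.py | algoritmo_voraz
-- ===== SOURCE A (Python) =====
-- def algoritmo_voraz(x, y, a, b, c, d):
--     """
--     Implementa el algoritmo voraz para transformar la cadena `x` en la cadena `y`
--     utilizando una serie de operaciones (avanzar, borrar, reemplazar, insertar) con costos asociados.
--
--     Args:
--         x (str): Cadena de texto origen.
--         y (str): Cadena de texto destino.
--         a (int): Costo de la operación 'advance'.
--         b (int): Costo de la operación 'delete'.
--         c (int): Costo de la operación 'replace'.
--         d (int): Costo de la operación 'insert'.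
--
--     Returns:
--         tuple: (costo total, lista de operaciones)
--     """
--     m, n = len(x), len(y)
--     i, j = 0, 0
--     operaciones = []
--     costo_total = 0
--
--     while i < m or j < n:
--         if i < m and j < n and x[i] == y[j]:
--             # Si los caracteres coinciden, avanzamos
--             operaciones.append('advance')
--             costo_total += a
--             i += 1
--             j += 1
--         elif i < m and j < n:
--             # Si no coinciden, hacemos un reemplazo
--             operaciones.append(f'replace {x[i]} with {y[j]}')
--             costo_total += c
--             i += 1
--             j += 1
--         elif i < m:
--             # Si hay más caracteres en x, eliminamos
--             operaciones.append(f'delete {x[i]}')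
--             costo_total += b
--             i += 1
--         elif j < n:
--             # Si hay más caracteres en y, insertamos
--             operaciones.append(f'insert {y[j]}')
--             costo_total += d
--             j += 1
--
--     return costo_total, operaciones
-- ===== SOURCE B (Python) =====
-- def algoritmo_voraz(x, y, a, b, c, d):
--     m, n = len(x), len(y)
--
--     def operacion(i):
--         # classify position i of the alignment directly
--         if i >= m:
--             return f'insert {y[i]}'
--         if i >= n:
--             return f'delete {x[i]}'
--         return 'advance' if x[i] == y[i] else f'replace {x[i]} with {y[i]}'
--
--     def costo(o):
--         # tariff read back from the operation's tag character
--         ch = o[0]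
--         if ch == 'a':
--             return a
--         if ch == 'd':
--             return b
--         if ch == 'r':
--             return c
--         return d
--
--     operaciones = [operacion(i) for i in range(max(m, n))]
--     costo_total = sum(map(costo, operaciones))
--     return costo_total, operaciones
-- ===== Notes on version B (the rewrite author's own statement) =====
-- stated objective: alternative
-- what changed: Instead of A's four-branch loop over two cursors that accumulates cost and ops together, B first builds the operation list by classifying each index of range(max(m,n)) with a standalone position function, then derives the total cost in a second stage by reading each op's tag character back through a tariff.
import Mathlib
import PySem

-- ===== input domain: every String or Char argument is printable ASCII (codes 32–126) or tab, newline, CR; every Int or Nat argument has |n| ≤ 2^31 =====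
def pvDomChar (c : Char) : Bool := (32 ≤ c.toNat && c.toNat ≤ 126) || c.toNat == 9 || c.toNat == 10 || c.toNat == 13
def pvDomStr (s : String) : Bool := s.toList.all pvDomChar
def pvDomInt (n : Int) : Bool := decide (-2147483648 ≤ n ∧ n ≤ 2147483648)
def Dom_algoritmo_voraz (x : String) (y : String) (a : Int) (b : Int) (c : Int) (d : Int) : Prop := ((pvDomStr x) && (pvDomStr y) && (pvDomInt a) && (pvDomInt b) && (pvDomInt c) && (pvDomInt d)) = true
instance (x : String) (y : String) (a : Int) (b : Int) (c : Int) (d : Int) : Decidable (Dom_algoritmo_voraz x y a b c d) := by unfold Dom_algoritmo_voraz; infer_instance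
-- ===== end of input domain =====

-- B replaces A's merged four-branch cursor loop with: classify each index of range(max(m,n))
-- into an operation string, then derive the total cost from the ops' tag characters (objective: alternative).


-- ===== PORT A =====
-- A's while-loop: two cursors i,j maintained as the remaining suffixes of x and y,
-- accumulating costo_total and operaciones exactly in A's branch order.
def vorazLoop (a b c d : Int) : List Char → List Char → Int → List String → Int × List String
  | xi :: xs, yi :: ys, cost, ops =>
    if xi == yi then
      vorazLoop a b c d xs ys (cost + a) (ops ++ ["advance"])
    else
      vorazLoop a b c d xs ys (cost + c)
        (ops ++ ["replace " ++ String.singleton xi ++ " with " ++ String.singleton yi])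
  | xi :: xs, [], cost, ops =>
      vorazLoop a b c d xs [] (cost + b) (ops ++ ["delete " ++ String.singleton xi])
  | [], yi :: ys, cost, ops =>
      vorazLoop a b c d [] ys (cost + d) (ops ++ ["insert " ++ String.singleton yi])
  | [], [], cost, ops => (cost, ops)

def algoritmo_voraz (x : String) (y : String) (a : Int) (b : Int) (c : Int) (d : Int) : Int × List String :=
  vorazLoop a b c d x.toList y.toList 0 []

-- ===== PORT B =====
-- operacion(i): classify alignment position i (branch order as in Source B).
-- The [none, none] arm is unreachable for i < max(m,n) (Python would raise there; never called).
def opAt (xs ys : List Char) (i : Nat) : String :=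
  match xs[i]?, ys[i]? with
  | none, some yi => "insert " ++ String.singleton yi
  | some xi, none => "delete " ++ String.singleton xi
  | some xi, some yi =>
      if xi == yi then "advance"
      else "replace " ++ String.singleton xi ++ " with " ++ String.singleton yi
  | none, none => ""

-- costo(o): tariff read back from the op's tag character o[0].
-- Ops are never empty, so the [] arm (Python: IndexError) is unreachable.
def costoOp (a b c d : Int) (o : String) : Int :=
  match o.toList with
  | ch :: _ =>
      if ch == 'a' then a else if ch == 'd' then b else if ch == 'r' then c else d
  | [] => 0

def algoritmo_voraz_alt (x : String) (y : String) (a : Int) (b : Int) (c : Int) (d : Int) : Int × List String :=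
  let operaciones := (List.range (max x.toList.length y.toList.length)).map (opAt x.toList y.toList)
  ((operaciones.map (costoOp a b c d)).foldl (· + ·) 0, operaciones)

-- ===== PRECONDITION & SPEC =====
def Spec_algoritmo_voraz (x : String) (y : String) (a : Int) (b : Int) (c : Int) (d : Int) (out : Int × List String) : Prop := out = algoritmo_voraz_alt x y a b c d
instance (x : String) (y : String) (a : Int) (b : Int) (c : Int) (d : Int) (out : Int × List String) : Decidable (Spec_algoritmo_voraz x y a b c d out) := by unfold Spec_algoritmo_voraz; infer_instance

-- ===== CLAIM (what is proved, stated in full; the proofs are below) =====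
def Claim_equal_algoritmo_voraz : Prop := ∀ (x : String) (y : String) (a : Int) (b : Int) (c : Int) (d : Int), Dom_algoritmo_voraz x y a b c d → Spec_algoritmo_voraz x y a b c d (algoritmo_voraz x y a b c d)

-- ===== LEMMAS AND PROOFS =====

def bOps (xs ys : List Char) : List String :=
  (List.range (max xs.length ys.length)).map (opAt xs ys)

def bSum (a b c d : Int) (l : List String) : Int :=
  (l.map (costoOp a b c d)).foldl (· + ·) 0

theorem foldl_add_shift (l : List Int) : ∀ (init : Int),
    l.foldl (· + ·) init = init + l.foldl (· + ·) 0 := by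
  induction l with
  | nil => intro init; simp
  | cons h t ih => intro init; simp only [List.foldl_cons]; rw [ih (init + h), ih (0 + h)]; ring

theorem bSum_cons (a b c d : Int) (o : String) (l : List String) :
    bSum a b c d (o :: l) = costoOp a b c d o + bSum a b c d l := by
  unfold bSum
  rw [List.map_cons, List.foldl_cons, Int.zero_add]
  exact foldl_add_shift _ _

theorem opAt_succ (x y : Char) (xs ys : List Char) (i : Nat) :
    opAt (x :: xs) (y :: ys) (i + 1) = opAt xs ys i := by
  simp [opAt]

theorem opAt_succ_left (x : Char) (xs : List Char) (i : Nat) :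
    opAt (x :: xs) [] (i + 1) = opAt xs [] i := by
  simp [opAt]

theorem opAt_succ_right (y : Char) (ys : List Char) (i : Nat) :
    opAt [] (y :: ys) (i + 1) = opAt [] ys i := by
  simp [opAt]

theorem bOps_cons (x y : Char) (xs ys : List Char) :
    bOps (x :: xs) (y :: ys) = opAt (x :: xs) (y :: ys) 0 :: bOps xs ys := by
  simp only [bOps, List.length_cons, Nat.succ_max_succ, List.range_succ_eq_map,
    List.map_cons, List.map_map]
  exact congrArg _ (List.map_congr_left fun i _ => opAt_succ x y xs ys i)

theorem bOps_cons_left (x : Char) (xs : List Char) :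
    bOps (x :: xs) [] = opAt (x :: xs) [] 0 :: bOps xs [] := by
  simp only [bOps, List.length_cons, List.length_nil, Nat.max_zero, List.range_succ_eq_map,
    List.map_cons, List.map_map]
  exact congrArg _ (List.map_congr_left fun i _ => opAt_succ_left x xs i)

theorem bOps_cons_right (y : Char) (ys : List Char) :
    bOps [] (y :: ys) = opAt [] (y :: ys) 0 :: bOps [] ys := by
  simp only [bOps, List.length_cons, List.length_nil, Nat.zero_max, List.range_succ_eq_map,
    List.map_cons, List.map_map]
  exact congrArg _ (List.map_congr_left fun i _ => opAt_succ_right y ys i)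

theorem costoOp_advance (a b c d : Int) : costoOp a b c d "advance" = a := by
  simp [costoOp]

theorem costoOp_replace (a b c d : Int) (xi yi : Char) :
    costoOp a b c d ("replace " ++ String.singleton xi ++ " with " ++ String.singleton yi) = c := by
  simp [costoOp, String.toList_append, String.singleton]

theorem costoOp_delete (a b c d : Int) (xi : Char) :
    costoOp a b c d ("delete " ++ String.singleton xi) = b := by
  simp [costoOp, String.toList_append, String.singleton]

theorem costoOp_insert (a b c d : Int) (yi : Char) :
    costoOp a b c d ("insert " ++ String.singleton yi) = d := by
  simp [costoOp, String.toList_append, String.singleton]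

theorem vorazLoop_eq (a b c d : Int) : ∀ (xs ys : List Char) (cost : Int) (ops : List String),
    vorazLoop a b c d xs ys cost ops = (cost + bSum a b c d (bOps xs ys), ops ++ bOps xs ys) := by
  intro xs
  induction xs with
  | nil =>
      intro ys
      induction ys with
      | nil => intro cost ops; simp [vorazLoop, bOps, bSum]
      | cons yi ys ih =>
          intro cost ops
          rw [vorazLoop, ih, bOps_cons_right]
          have h0 : opAt [] (yi :: ys) 0 = "insert " ++ String.singleton yi := by simp [opAt]
          rw [h0, bSum_cons, costoOp_insert]
          simp only [Prod.mk.injEq, List.append_assoc, List.singleton_append]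
          exact ⟨by ring, trivial⟩
  | cons xi xs ih =>
      intro ys cost ops
      cases ys with
      | nil =>
          rw [vorazLoop, ih, bOps_cons_left]
          have h0 : opAt (xi :: xs) [] 0 = "delete " ++ String.singleton xi := by simp [opAt]
          rw [h0, bSum_cons, costoOp_delete]
          simp only [Prod.mk.injEq, List.append_assoc, List.singleton_append]
          exact ⟨by ring, trivial⟩
      | cons yi ys =>
          by_cases h : xi = yi
          · rw [vorazLoop]
            simp only [h, beq_self_eq_true, if_true]
            rw [ih, bOps_cons]
            have h0 : opAt (yi :: xs) (yi :: ys) 0 = "advance" := by simp [opAt]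
            rw [h0, bSum_cons, costoOp_advance]
            simp only [Prod.mk.injEq, List.append_assoc, List.singleton_append]
            exact ⟨by ring, trivial⟩
          · have hb : (xi == yi) = false := by simp [h]
            rw [vorazLoop]
            simp only [hb, Bool.false_eq_true, if_false]
            rw [ih, bOps_cons]
            have h0 : opAt (xi :: xs) (yi :: ys) 0 =
                "replace " ++ String.singleton xi ++ " with " ++ String.singleton yi := by
              simp [opAt, hb]
            rw [h0, bSum_cons, costoOp_replace]
            simp only [Prod.mk.injEq, List.append_assoc, List.singleton_append]
            exact ⟨by ring, trivial⟩

-- ===== VERDICT (by name: the statement is the Claim_ definition above) =====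
theorem algoritmo_voraz_spec : Claim_equal_algoritmo_voraz := by
  intro x y a b c d _
  unfold Spec_algoritmo_voraz algoritmo_voraz algoritmo_voraz_alt
  rw [vorazLoop_eq]
  simp [bOps, bSum]
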